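-- pv_equiv track=rewrite | github.com/watsoncole/racko_ai | card game ai (RACKO).py | ai_racko
-- ===== SOURCE A (Python) =====
-- def ai_racko(pile, original_hand):
--     hand = original_hand[:]
--     card = pile[len(pile) - 1]
--     #checks for racko if card is taken
--     for j in range(len(hand)):
--         temp = hand[j]
--         hand[j] = card
--         nottrue = 0
--         for i in range(len(hand) - 1):
--             if hand[i] > hand[i + 1]:
--                 nottrue = 1
--         hand[j] = temp
--         if nottrue == 0:
--             return True, j
--     return False, None
-- ===== SOURCE B (Python) =====
-- def ai_racko(pile, original_hand):
--     hand = original_hand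
--     card = pile[-1]
--     n = len(hand)
--     # prefix/suffix increasing-run flags: pref[i] = hand[:i+1] nondecreasing, suff[i] = hand[i:] nondecreasing
--     pref = [True] * n
--     for i in range(1, n):
--         pref[i] = pref[i - 1] and hand[i - 1] <= hand[i]
--     suff = [True] * n
--     for i in reversed(range(n - 1)):
--         suff[i] = suff[i + 1] and hand[i] <= hand[i + 1]
--     for j in range(n):
--         left = j == 0 or (pref[j - 1] and hand[j - 1] <= card)
--         right = j == n - 1 or (suff[j + 1] and card <= hand[j + 1])
--         if left and right:
--             return True, j
--     return False, None
-- ===== Notes on version B (the rewrite author's own statement) =====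
-- stated objective: faster
-- what changed: Replaces A's O(n) full-sortedness rescan for every candidate slot with one precomputed pass of prefix/suffix nondecreasing-run flags, making each slot check O(1).
import Mathlib
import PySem

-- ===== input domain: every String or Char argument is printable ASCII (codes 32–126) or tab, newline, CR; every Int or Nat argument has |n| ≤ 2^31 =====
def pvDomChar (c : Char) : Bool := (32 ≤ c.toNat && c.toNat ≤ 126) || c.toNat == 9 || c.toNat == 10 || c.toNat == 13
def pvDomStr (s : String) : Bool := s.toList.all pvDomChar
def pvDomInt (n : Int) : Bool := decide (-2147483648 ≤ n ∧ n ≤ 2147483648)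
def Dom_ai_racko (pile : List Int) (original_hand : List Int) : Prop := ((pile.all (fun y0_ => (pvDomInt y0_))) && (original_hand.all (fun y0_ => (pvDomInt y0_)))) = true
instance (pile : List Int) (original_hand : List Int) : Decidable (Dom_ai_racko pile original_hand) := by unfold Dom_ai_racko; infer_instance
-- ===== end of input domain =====

-- B replaces A's O(n) full-sortedness rescan per slot with precomputed prefix/suffix
-- nondecreasing-run flags, giving an O(1) check per slot (O(n) total vs A's O(n^2)).


-- ===== PORT A =====
-- inner loop: nottrue = 0; for i in range(len(hand)-1): if hand[i] > hand[i+1]: nottrue = 1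
def aInner (hand : List Int) : Int :=
  (List.range (hand.length - 1)).foldl
    (fun nt i => if hand.getD i 0 > hand.getD (i + 1) 0 then 1 else nt) 0

-- outer loop: try slot j (hand[j] = card, check, restore), else j+1
def aLoop (card : Int) (hand : List Int) (j : Nat) : Bool × Option Int :=
  if _h : j < hand.length then
    if aInner (hand.set j card) = 0 then (true, some (j : Int))
    else aLoop card hand (j + 1)
  else (false, none)
termination_by hand.length - j

def ai_racko (pile : List Int) (original_hand : List Int) : Bool × Option Int :=
  let hand := original_hand
  let card := (PySem.List.pyGet? pile ((pile.length : Int) - 1)).getD 0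
  aLoop card hand 0

-- ===== PORT B =====
-- pref = [True]*n; for i in range(1, n): pref[i] = pref[i-1] and hand[i-1] <= hand[i]
def prefArr (hand : List Int) : List Bool :=
  (List.range' 1 (hand.length - 1)).foldl
    (fun p i => p.set i (p.getD (i - 1) true && decide (hand.getD (i - 1) 0 ≤ hand.getD i 0)))
    (List.replicate hand.length true)

-- suff = [True]*n; for i in reversed(range(n-1)): suff[i] = suff[i+1] and hand[i] <= hand[i+1]
def suffArr (hand : List Int) : List Bool :=
  ((List.range (hand.length - 1)).reverse).foldl
    (fun s i => s.set i (s.getD (i + 1) true && decide (hand.getD i 0 ≤ hand.getD (i + 1) 0)))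
    (List.replicate hand.length true)

-- for j in range(n): left/right O(1) tests against the precomputed flags
def bLoop (card : Int) (hand : List Int) (pref suff : List Bool) (j : Nat) : Bool × Option Int :=
  if _h : j < hand.length then
    let left := decide (j = 0) || (pref.getD (j - 1) true && decide (hand.getD (j - 1) 0 ≤ card))
    let right := decide (j = hand.length - 1) || (suff.getD (j + 1) true && decide (card ≤ hand.getD (j + 1) 0))
    if left && right then (true, some (j : Int)) else bLoop card hand pref suff (j + 1)
  else (false, none)
termination_by hand.length - j

def ai_racko_alt (pile : List Int) (original_hand : List Int) : Bool × Option Int :=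
  let hand := original_hand
  let card := (PySem.List.pyGet? pile (-1)).getD 0
  bLoop card hand (prefArr hand) (suffArr hand) 0

-- ===== PRECONDITION & SPEC =====
-- A raises IndexError on pile = [] (pile[len(pile)-1]); those inputs are excluded.
def Pre_ai_racko (pile : List Int) (original_hand : List Int) : Prop := pile ≠ []
instance (pile : List Int) (original_hand : List Int) : Decidable (Pre_ai_racko pile original_hand) := by unfold Pre_ai_racko; infer_instance
def pvWitness_ai_racko : List Int × List Int := ([5], [1, 9, 4])

def Spec_ai_racko (pile : List Int) (original_hand : List Int) (out : Bool × Option Int) : Prop := out = ai_racko_alt pile original_hand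
instance (pile : List Int) (original_hand : List Int) (out : Bool × Option Int) : Decidable (Spec_ai_racko pile original_hand out) := by unfold Spec_ai_racko; infer_instance

-- ===== CLAIM (what is proved, stated in full; the proofs are below) =====
def Claim_equal_ai_racko : Prop := ∀ (pile : List Int) (original_hand : List Int), Dom_ai_racko pile original_hand → Pre_ai_racko pile original_hand → Spec_ai_racko pile original_hand (ai_racko pile original_hand)

-- ===== LEMMAS AND PROOFS =====

-- adjacent-pair test used by both characterisations
def adjB (hand : List Int) (k : Nat) : Bool := decide (hand.getD k 0 ≤ hand.getD (k + 1) 0)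

-- all-adjacent flags: prefix hand[:i+1] sorted, suffix hand[i:] sorted
def prefAll (hand : List Int) (i : Nat) : Bool := (List.range i).all (adjB hand)
def suffAll (hand : List Int) (i : Nat) : Bool := (List.range' i (hand.length - 1 - i)).all (adjB hand)

theorem getD_set {α : Type} (l : List α) (i k : Nat) (b d : α) :
    (l.set i b).getD k d = if i = k ∧ i < l.length then b else l.getD k d := by
  simp only [List.getD, List.getElem?_set]
  by_cases h1 : i = k
  · subst h1
    by_cases h2 : i < l.length
    · simp [h2]
    · have h3 : l[i]? = none := List.getElem?_eq_none (by omega)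
      simp [h2, h3]
  · simp [h1]

theorem foldl_set_length {α : Type} (f : List α → Nat → α) (l : List Nat) (init : List α) :
    (l.foldl (fun p i => p.set i (f p i)) init).length = init.length := by
  induction l generalizing init with
  | nil => rfl
  | cons x xs ih => simp [List.foldl_cons, ih]

theorem foldl_flag (P : Nat → Prop) [DecidablePred P] (l : List Nat) (a : Int) :
    l.foldl (fun nt i => if P i then 1 else nt) a = if ∃ i ∈ l, P i then 1 else a := by
  induction l generalizing a with
  | nil => simp
  | cons x xs ih =>
    simp only [List.foldl_cons, ih, List.mem_cons]
    by_cases h : P x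
    · simp [h]
    · by_cases h2 : ∃ i ∈ xs, P i <;> simp [h, h2]

theorem aInner_eq_zero (h : List Int) :
    aInner h = 0 ↔ ∀ i, i + 1 < h.length → h.getD i 0 ≤ h.getD (i + 1) 0 := by
  unfold aInner
  rw [foldl_flag (fun i => h.getD i 0 > h.getD (i + 1) 0)]
  split_ifs with hh
  · simp only [List.mem_range] at hh
    obtain ⟨i, hi, hgt⟩ := hh
    constructor
    · intro h0; omega
    · intro hall; have := hall i (by omega); omega
  · simp only [List.mem_range, not_exists, not_and, not_lt] at hh
    constructor
    · intro _ i hi; exact hh i (by omega)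
    · intro _; rfl

theorem prefArr_spec (hand : List Int) :
    ∀ i < hand.length, (prefArr hand).getD i true = prefAll hand i := by
  unfold prefArr
  have main : ∀ m, m ≤ hand.length - 1 →
      ∀ i < hand.length,
        ((List.range' 1 m).foldl
          (fun p i => p.set i (p.getD (i - 1) true && decide (hand.getD (i - 1) 0 ≤ hand.getD i 0)))
          (List.replicate hand.length true)).getD i true
        = if i ≤ m then prefAll hand i else true := by
    intro m
    induction m with
    | zero =>
      intro _ i hi
      simp only [List.range'_zero, List.foldl_nil]
      rw [List.getD_replicate _ hi]
      split_ifs with h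
      · simp [prefAll, show i = 0 from by omega]
      · rfl
    | succ m ih =>
      intro hm i hi
      rw [List.range'_concat, List.foldl_concat]
      simp only [one_mul]
      have hlen : ((List.range' 1 m).foldl
          (fun p i => p.set i (p.getD (i - 1) true && decide (hand.getD (i - 1) 0 ≤ hand.getD i 0)))
          (List.replicate hand.length true)).length = hand.length := by
        have := foldl_set_length
          (fun (p : List Bool) i => p.getD (i - 1) true && decide (hand.getD (i - 1) 0 ≤ hand.getD i 0))
          (List.range' 1 m) (List.replicate hand.length true)
        simpa using this
      have hstep := ih (by omega)
      rw [getD_set, hlen]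
      by_cases hEq : 1 + m = i
      · rw [if_pos ⟨hEq, by omega⟩]
        rw [hstep (1 + m - 1) (by omega)]
        rw [show 1 + m - 1 = m from by omega, if_pos (le_refl m)]
        subst hEq
        rw [if_pos (by omega : 1 + m ≤ m + 1)]
        simp [prefAll, show 1 + m = m + 1 from by omega, List.range_succ, adjB]
      · rw [if_neg (fun hc => hEq hc.1)]
        rw [hstep i hi]
        by_cases h2 : i ≤ m
        · rw [if_pos h2, if_pos (by omega)]
        · rw [if_neg h2, if_neg (by omega)]
  intro i hi
  have := main (hand.length - 1) (le_refl _) i hi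
  rw [this, if_pos (by omega)]

theorem suffFold_inv (hand : List Int) :
    ∀ m, m ≤ hand.length - 1 → ∀ init : List Bool, init.length = hand.length →
      (∀ i, m ≤ i → init.getD i true = suffAll hand i) →
      ∀ i, ((List.range m).reverse.foldl
          (fun s i => s.set i (s.getD (i + 1) true && decide (hand.getD i 0 ≤ hand.getD (i + 1) 0)))
          init).getD i true
        = if i < m then suffAll hand i else init.getD i true := by
  intro m
  induction m with
  | zero => intro _ init _ _ i; simp
  | succ m ih =>
    intro hm init hlen hinit i
    rw [List.range_succ, List.reverse_append, List.reverse_singleton, List.singleton_append,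
        List.foldl_cons]
    have hval : (init.getD (m + 1) true && decide (hand.getD m 0 ≤ hand.getD (m + 1) 0))
        = suffAll hand m := by
      rw [hinit (m + 1) (by omega)]
      have hsplit : suffAll hand m = (adjB hand m && suffAll hand (m + 1)) := by
        simp only [suffAll]
        rw [show hand.length - 1 - m = (hand.length - 1 - (m + 1)) + 1 from by omega,
            List.range'_succ, List.all_cons]
      rw [hsplit, Bool.and_comm]
      rfl
    have hgetD : ∀ k, ((init.set m (init.getD (m + 1) true && decide (hand.getD m 0 ≤ hand.getD (m + 1) 0))).getD k true)
        = if m = k ∧ m < init.length then suffAll hand m else init.getD k true := by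
      intro k; rw [getD_set]
      split_ifs with h
      · exact hval
      · rfl
    have hlen' : (init.set m (init.getD (m + 1) true && decide (hand.getD m 0 ≤ hand.getD (m + 1) 0))).length = hand.length := by
      simp [hlen]
    have hinitP : ∀ k, m ≤ k →
        (init.set m (init.getD (m + 1) true && decide (hand.getD m 0 ≤ hand.getD (m + 1) 0))).getD k true
        = suffAll hand k := by
      intro k hk
      rw [hgetD k]
      by_cases h : m = k
      · rw [if_pos ⟨h, by omega⟩, h]
      · rw [if_neg (fun hc => h hc.1)]
        exact hinit k (by omega)
    rw [ih (by omega) _ hlen' hinitP i]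
    by_cases h1 : i < m
    · rw [if_pos h1, if_pos (by omega)]
    · rw [if_neg h1, hgetD i]
      by_cases h2 : m = i
      · rw [if_pos ⟨h2, by omega⟩, if_pos (by omega), h2]
      · rw [if_neg (fun hc => h2 hc.1), if_neg (by omega)]

theorem suffArr_spec (hand : List Int) :
    ∀ i, (suffArr hand).getD i true = suffAll hand i := by
  intro i
  unfold suffArr
  have hinit : ∀ i, hand.length - 1 ≤ i → (List.replicate hand.length true).getD i true = suffAll hand i := by
    intro i hi
    have h1 : suffAll hand i = true := by
      simp only [suffAll, show hand.length - 1 - i = 0 from by omega, List.range'_zero, List.all_nil]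
    rw [h1]
    by_cases h : i < hand.length
    · exact List.getD_replicate _ h
    · have h2 : (List.replicate hand.length true)[i]? = none := List.getElem?_eq_none (by simp; omega)
      simp [List.getD, h2]
  rw [suffFold_inv hand (hand.length - 1) (le_refl _) (List.replicate hand.length true) (by simp) hinit i]
  split_ifs with h
  · rfl
  · exact hinit i (by omega)

-- value of the modified hand at an index
theorem set_getD (hand : List Int) (j : Nat) (card : Int) (k : Nat) (hj : j < hand.length) :
    (hand.set j card).getD k 0 = if j = k then card else hand.getD k 0 := by
  rw [getD_set]
  by_cases h : j = k
  · rw [if_pos ⟨h, hj⟩, if_pos h]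
  · rw [if_neg (fun hc => h hc.1), if_neg h]

-- the O(1) per-slot test equals A's full rescan
theorem check_iff (hand : List Int) (card : Int) (j : Nat) (hj : j < hand.length) :
    ((decide (j = 0) || ((prefArr hand).getD (j - 1) true && decide (hand.getD (j - 1) 0 ≤ card))) &&
     (decide (j = hand.length - 1) || ((suffArr hand).getD (j + 1) true && decide (card ≤ hand.getD (j + 1) 0))))
    = decide (aInner (hand.set j card) = 0) := by
  have hset : (hand.set j card).length = hand.length := by simp
  rw [prefArr_spec hand (j - 1) (by omega), suffArr_spec hand (j + 1)]
  rw [Bool.eq_iff_iff]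
  simp only [prefAll, suffAll, adjB, Bool.and_eq_true, Bool.or_eq_true, decide_eq_true_eq,
    List.all_eq_true, List.mem_range, List.mem_range'_1]
  rw [aInner_eq_zero]
  rw [hset]
  constructor
  · rintro ⟨hleft, hright⟩ i hi
    rw [set_getD hand j card i hj, set_getD hand j card (i + 1) hj]
    by_cases hij : j = i
    · subst hij
      rw [if_pos rfl, if_neg (by omega)]
      rcases hright with h | ⟨_, h⟩
      · omega
      · exact h
    · rw [if_neg hij]
      by_cases hij1 : j = i + 1
      · rw [if_pos hij1]
        rcases hleft with h | ⟨_, h⟩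
        · omega
        · subst hij1; simpa using h
      · rw [if_neg hij1]
        rcases hleft with h0 | ⟨hl, _⟩
        · rcases hright with hr | ⟨hs, _⟩
          · omega
          · exact hs i ⟨by omega, by omega⟩
        · by_cases hlt : i + 1 < j
          · exact hl i (by omega)
          · rcases hright with hr | ⟨hs, _⟩
            · omega
            · exact hs i ⟨by omega, by omega⟩
  · intro hall
    constructor
    · by_cases h0 : j = 0
      · exact Or.inl h0
      · refine Or.inr ⟨?_, ?_⟩
        · intro k hk
          have := hall k (by omega)
          rw [set_getD hand j card k hj, set_getD hand j card (k + 1) hj,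
              if_neg (by omega), if_neg (by omega)] at this
          exact this
        · have := hall (j - 1) (by omega)
          rw [set_getD hand j card (j - 1) hj, set_getD hand j card (j - 1 + 1) hj,
              if_neg (by omega), if_pos (by omega)] at this
          exact this
    · by_cases hl : j = hand.length - 1
      · exact Or.inl hl
      · refine Or.inr ⟨?_, ?_⟩
        · intro k hk
          have := hall k (by omega)
          rw [set_getD hand j card k hj, set_getD hand j card (k + 1) hj,
              if_neg (by omega), if_neg (by omega)] at this
          exact this
        · have := hall j (by omega)
          rw [set_getD hand j card j hj, set_getD hand j card (j + 1) hj,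
              if_pos rfl, if_neg (by omega)] at this
          exact this

theorem loop_eq (card : Int) (hand : List Int) :
    ∀ j, aLoop card hand j = bLoop card hand (prefArr hand) (suffArr hand) j := by
  intro j
  induction hn : hand.length - j using Nat.strong_induction_on generalizing j with
  | _ n ih =>
    rw [aLoop, bLoop]
    by_cases hj : j < hand.length
    · rw [dif_pos hj, dif_pos hj]
      simp only []
      rw [check_iff hand card j hj]
      by_cases hc : aInner (hand.set j card) = 0
      · simp [hc]
      · simp only [hc, decide_false, if_neg hc, Bool.false_eq_true, if_false]
        exact ih (hand.length - (j + 1)) (by omega) (j + 1) rfl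
    · rw [dif_neg hj, dif_neg hj]

theorem cards_eq (pile : List Int) (hne : pile ≠ []) :
    (PySem.List.pyGet? pile ((pile.length : Int) - 1)).getD 0
      = (PySem.List.pyGet? pile (-1)).getD 0 := by
  rw [PySem.List.pyGet?_neg_one]
  have h : ((pile.length : Int) - 1) = ((pile.length - 1 : Nat) : Int) := by
    have : 1 ≤ pile.length := List.length_pos_iff.mpr hne
    omega
  rw [h, PySem.List.pyGet?_natCast]
  rw [List.getLast?_eq_getElem?]

-- ===== VERDICT (by name: the statement is the Claim_ definition above) =====
theorem ai_racko_spec : Claim_equal_ai_racko := by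
  intro pile hand _ hpre
  unfold Spec_ai_racko ai_racko ai_racko_alt
  simp only []
  rw [cards_eq pile hpre]
  exact loop_eq _ hand 0
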